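-- pv_equiv track=rewrite | github.com/MrBrantCode/unitest_baseline | mut_generate/mist_train_cf/cf_16813/solution.py | find_second_largest_odd_index
-- ===== SOURCE A (Python) =====
-- def find_second_largest_odd_index(nums):
--     largest = second_largest = float('-inf')
--     largest_index = second_largest_index = -1
--
--     for i, num in enumerate(nums):
--         if num % 2 != 0:
--             if num > largest:
--                 second_largest = largest
--                 second_largest_index = largest_index
--                 largest = num
--                 largest_index = i
--             elif num > second_largest and num != largest:
--                 second_largest = num
--                 second_largest_index = i
--
--     return second_largest_index
-- ===== SOURCE B (Python) =====
-- def find_second_largest_odd_index(nums):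
--     odds = [v for v in nums if v % 2 != 0]
--     if not odds:
--         return -1
--     m = max(odds)
--     lower = [v for v in odds if v < m]
--     if not lower:
--         return -1
--     return nums.index(max(lower))
-- ===== Notes on version B (the rewrite author's own statement) =====
-- stated objective: simpler
-- what changed: Replaces A's fused single scan maintaining four running variables (largest/second-largest odd value and their indices, with a -inf sentinel) by a plain decomposition: filter the odd values, take the maximum, take the maximum of the strictly-smaller odd values, and return its first index with list.index.
import Mathlib
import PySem

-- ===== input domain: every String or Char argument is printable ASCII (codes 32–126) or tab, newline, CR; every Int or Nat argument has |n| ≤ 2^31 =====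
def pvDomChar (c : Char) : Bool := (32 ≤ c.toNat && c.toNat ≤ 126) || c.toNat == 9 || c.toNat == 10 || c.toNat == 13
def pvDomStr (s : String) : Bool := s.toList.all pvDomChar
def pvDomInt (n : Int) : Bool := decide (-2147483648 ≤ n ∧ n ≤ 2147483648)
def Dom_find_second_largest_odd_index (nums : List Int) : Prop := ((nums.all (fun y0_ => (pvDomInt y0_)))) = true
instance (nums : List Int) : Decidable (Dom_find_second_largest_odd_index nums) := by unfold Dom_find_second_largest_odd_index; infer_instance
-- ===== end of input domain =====

-- B replaces A's fused four-variable scan by filter / two max reductions / a first-index lookup (objective: simpler).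

-- ===== PORT A =====
-- 'num > largest' with largest possibly float('-inf'): none plays -inf
def pvGtNegInf (num : Int) (o : Option Int) : Bool :=
  match o with
  | none => true
  | some l => decide (l < num)

def pvStepA (st : Option Int × Option Int × Int × Int) (p : Int × Int) :
    Option Int × Option Int × Int × Int :=
  let largest := st.1
  let second := st.2.1
  let li := st.2.2.1
  let _si := st.2.2.2
  let i := p.1
  let num := p.2
  if PySem.Int.mod num 2 ≠ 0 then
    if pvGtNegInf num largest then (some num, largest, i, li)
    else if pvGtNegInf num second && decide (largest ≠ some num) then (largest, some num, li, i)
    else st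
  else st

def find_second_largest_odd_index (nums : List Int) : Int :=
  ((PySem.List.enumerate nums).foldl pvStepA (none, none, -1, -1)).2.2.2

-- ===== PORT B =====
def find_second_largest_odd_index_alt (nums : List Int) : Int :=
  let odds := nums.filter (fun v => PySem.Int.mod v 2 ≠ 0)
  if odds.isEmpty then -1
  else
    match PySem.List.max? odds (fun x => x) with
    | none => -1
    | some m =>
      let lower := odds.filter (fun v => v < m)
      if lower.isEmpty then -1
      else
        match PySem.List.max? lower (fun x => x) with
        | none => -1
        | some s =>
          match PySem.List.index? nums s with
          | none => -1   -- unreachable: s is an element of nums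
          | some k => (k : Int)

-- ===== PRECONDITION & SPEC =====
def Spec_find_second_largest_odd_index (nums : List Int) (out : Int) : Prop := out = find_second_largest_odd_index_alt nums
instance (nums : List Int) (out : Int) : Decidable (Spec_find_second_largest_odd_index nums out) := by unfold Spec_find_second_largest_odd_index; infer_instance

-- ===== CLAIM (what is proved, stated in full; the proofs are below) =====
def Claim_equal_find_second_largest_odd_index : Prop := ∀ (nums : List Int), Dom_find_second_largest_odd_index nums → Spec_find_second_largest_odd_index nums (find_second_largest_odd_index nums)

-- ===== LEMMAS AND PROOFS =====

-- spec-side descriptions of A's four loop variables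
def pvOdds (l : List Int) : List Int := l.filter (fun v => PySem.Int.mod v 2 ≠ 0)

def pvMaxV (l : List Int) : Option Int := PySem.List.max? (pvOdds l) (fun x => x)

def pvSndV (l : List Int) : Option Int :=
  match pvMaxV l with
  | none => none
  | some m => PySem.List.max? ((pvOdds l).filter (fun v => v < m)) (fun x => x)

def pvIxOf (l : List Int) (o : Option Int) : Int :=
  match o with
  | none => -1
  | some v =>
    match PySem.List.index? l v with
    | none => -1
    | some k => (k : Int)

lemma pv_max?_eq_some_iff (xs : List Int) (m : Int) :
    PySem.List.max? xs (fun x => x) = some m ↔ m ∈ xs ∧ ∀ y ∈ xs, y ≤ m := by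
  constructor
  · intro h
    exact ⟨PySem.List.max?_mem h, fun y hy => PySem.List.max?_isMax h y hy⟩
  · rintro ⟨hm, hub⟩
    cases hcase : PySem.List.max? xs (fun x => x) with
    | none =>
      rw [PySem.List.max?_eq_none_iff] at hcase
      simp [hcase] at hm
    | some m' =>
      have h1 := PySem.List.max?_mem hcase
      have h2 := PySem.List.max?_isMax hcase m hm
      have h3 := hub m' h1
      exact congrArg some (le_antisymm h3 h2)

lemma pv_mem_odds (l : List Int) (v : Int) :
    v ∈ pvOdds l ↔ v ∈ l ∧ PySem.Int.mod v 2 ≠ 0 := by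
  simp [pvOdds, List.mem_filter]

lemma pv_ix_append_of_mem (q : List Int) (x v : Int) (h : v ∈ q) :
    pvIxOf (q ++ [x]) (some v) = pvIxOf q (some v) := by
  simp only [pvIxOf, PySem.List.index?_append_of_mem [x] h]

lemma pv_ix_append_self (q : List Int) (x : Int) (h : x ∉ q) :
    pvIxOf (q ++ [x]) (some x) = (q.length : Int) := by
  simp only [pvIxOf, PySem.List.index?_append_singleton_self q x h]

lemma pv_state_char (l : List Int) :
    (PySem.List.enumerate l).foldl pvStepA (none, none, -1, -1)
      = (pvMaxV l, pvSndV l, pvIxOf l (pvMaxV l), pvIxOf l (pvSndV l)) := by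
  induction l using List.reverseRecOn with
  | nil => rfl
  | append_singleton q x ih =>
    rw [PySem.List.enumerate_append, List.foldl_append, ih,
        PySem.List.enumerate_cons, PySem.List.enumerate_nil]
    simp only [List.foldl_cons, List.foldl_nil, zero_add]
    by_cases hx : PySem.Int.mod x 2 = 0
    · -- even element: everything is unchanged
      have hx0 : x % 2 = 0 := by
        rw [PySem.Int.mod_eq_emod_of_pos (by norm_num : (0:Int) < 2)] at hx; exact hx
      have hdvd : (2:Int) ∣ x := by omega
      have ho : pvOdds (q ++ [x]) = pvOdds q := by
        simp [pvOdds, List.filter_append, hdvd]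
      have hM : pvMaxV (q ++ [x]) = pvMaxV q := by simp only [pvMaxV, ho]
      have hS : pvSndV (q ++ [x]) = pvSndV q := by simp only [pvSndV, hM, ho]
      have hixM : pvIxOf (q ++ [x]) (pvMaxV q) = pvIxOf q (pvMaxV q) := by
        cases hm : pvMaxV q with
        | none => rfl
        | some v =>
          exact pv_ix_append_of_mem q x v ((pv_mem_odds q v).mp (PySem.List.max?_mem hm)).1
      have hixS : pvIxOf (q ++ [x]) (pvSndV q) = pvIxOf q (pvSndV q) := by
        cases hsv : pvSndV q with
        | none => rfl
        | some s =>
          cases hm : pvMaxV q with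
          | none =>
            simp only [pvSndV, hm] at hsv
            cases hsv
          | some m =>
            simp only [pvSndV, hm] at hsv
            have := List.mem_of_mem_filter (PySem.List.max?_mem hsv)
            exact pv_ix_append_of_mem q x s ((pv_mem_odds q s).mp this).1
      rw [hM, hS, hixM, hixS]
      simp [pvStepA, hx0]
    · -- odd element
      have hxne : PySem.Int.mod x 2 ≠ 0 := hx
      have hx1 : x % 2 = 1 := by
        rw [PySem.Int.mod_eq_emod_of_pos (by norm_num : (0:Int) < 2)] at hx; omega
      have ho : pvOdds (q ++ [x]) = pvOdds q ++ [x] := by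
        simp [pvOdds, List.filter_append, hx1]
      cases hM : pvMaxV q with
      | none =>
        have hoq : pvOdds q = [] := by
          rw [pvMaxV] at hM; exact (PySem.List.max?_eq_none_iff _ _).mp hM
        have ho2 : pvOdds (q ++ [x]) = [x] := by rw [ho, hoq, List.nil_append]
        have hM' : pvMaxV (q ++ [x]) = some x := by
          rw [pvMaxV, ho2, PySem.List.max?_id_cons]; rfl
        have hS' : pvSndV (q ++ [x]) = none := by
          simp only [pvSndV, hM', ho2]
          simp [PySem.List.max?_eq_none_iff]
        have hxq : x ∉ q := by
          intro hxq
          have : x ∈ pvOdds q := (pv_mem_odds q x).mpr ⟨hxq, hxne⟩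
          rw [hoq] at this; exact absurd this (List.not_mem_nil)
        rw [hM', hS', pv_ix_append_self q x hxq]
        simp [pvStepA, pvGtNegInf, hx1, pvIxOf]
      | some m =>
        have hmOdds : m ∈ pvOdds q := PySem.List.max?_mem (by rw [pvMaxV] at hM; exact hM)
        have hub : ∀ y ∈ pvOdds q, y ≤ m :=
          fun y hy => PySem.List.max?_isMax (by rw [pvMaxV] at hM; exact hM) y hy
        have hmq : m ∈ q := ((pv_mem_odds q m).mp hmOdds).1
        by_cases hgt : m < x
        · -- new maximum; old maximum becomes second
          have hxq : x ∉ q := fun hxq =>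
            absurd (hub x ((pv_mem_odds q x).mpr ⟨hxq, hxne⟩)) (by omega)
          have hM' : pvMaxV (q ++ [x]) = some x := by
            rw [pvMaxV, pv_max?_eq_some_iff]
            rw [ho]
            refine ⟨List.mem_append_right _ (List.mem_singleton_self x), ?_⟩
            intro y hy
            rcases List.mem_append.mp hy with h | h
            · have := hub y h; omega
            · rw [List.mem_singleton.mp h]
          have hfil : (pvOdds (q ++ [x])).filter (fun v => v < x) = pvOdds q := by
            rw [ho, List.filter_append]
            have h1 : (pvOdds q).filter (fun v => v < x) = pvOdds q :=
              List.filter_eq_self.mpr (fun y hy => by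
                have := hub y hy; simp; omega)
            have h2 : ([x] : List Int).filter (fun v => v < x) = [] := by simp
            rw [h1, h2, List.append_nil]
          have hS' : pvSndV (q ++ [x]) = some m := by
            simp only [pvSndV, hM']
            rw [hfil]
            rw [pvMaxV] at hM; exact hM
          rw [hM', hS', pv_ix_append_self q x hxq, pv_ix_append_of_mem q x m hmq]
          simp [pvStepA, pvGtNegInf, hx1, hgt]
        · -- x ≤ m: maximum unchanged
          have hxle : x ≤ m := by omega
          have hM' : pvMaxV (q ++ [x]) = some m := by
            rw [pvMaxV, pv_max?_eq_some_iff, ho]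
            refine ⟨List.mem_append_left _ hmOdds, ?_⟩
            intro y hy
            rcases List.mem_append.mp hy with h | h
            · exact hub y h
            · rw [List.mem_singleton.mp h]; exact hxle
          have hixM' : pvIxOf (q ++ [x]) (some m) = pvIxOf q (some m) :=
            pv_ix_append_of_mem q x m hmq
          by_cases hxm : x = m
          · -- equal to the maximum: state unchanged
            have hfil : (pvOdds (q ++ [x])).filter (fun v => v < m) = (pvOdds q).filter (fun v => v < m) := by
              rw [ho, List.filter_append]
              have h2 : ([x] : List Int).filter (fun v => v < m) = [] := by
                simp [hxm]
              rw [h2, List.append_nil]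
            have hS' : pvSndV (q ++ [x]) = pvSndV q := by
              simp only [pvSndV, hM', hM]
              rw [hfil]
            have hixS : pvIxOf (q ++ [x]) (pvSndV q) = pvIxOf q (pvSndV q) := by
              cases hsv : pvSndV q with
              | none => rfl
              | some s =>
                simp only [pvSndV, hM] at hsv
                have := List.mem_of_mem_filter (PySem.List.max?_mem hsv)
                exact pv_ix_append_of_mem q x s ((pv_mem_odds q s).mp this).1
            rw [hM', hS', hixM', hixS]
            simp [pvStepA, pvGtNegInf, hxm]
          · -- x < m
            have hxlt : x < m := by omega
            have hfil : (pvOdds (q ++ [x])).filter (fun v => v < m)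
                = (pvOdds q).filter (fun v => v < m) ++ [x] := by
              rw [ho, List.filter_append]
              have h2 : ([x] : List Int).filter (fun v => v < m) = [x] := by
                simp [hxlt]
              rw [h2]
            cases hS : pvSndV q with
            | none =>
              have hfq : (pvOdds q).filter (fun v => v < m) = [] := by
                simp only [pvSndV, hM] at hS
                exact (PySem.List.max?_eq_none_iff _ _).mp hS
              have hS' : pvSndV (q ++ [x]) = some x := by
                simp only [pvSndV, hM']
                rw [hfil, hfq, List.nil_append, PySem.List.max?_id_cons]; rfl
              have hxq : x ∉ q := by
                intro hxq
                have h1 : x ∈ (pvOdds q).filter (fun v => v < m) :=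
                  List.mem_filter.mpr ⟨(pv_mem_odds q x).mpr ⟨hxq, hxne⟩, by simp [hxlt]⟩
                rw [hfq] at h1; exact absurd h1 (List.not_mem_nil)
              have hmx : ¬ m = x := fun h => hxm h.symm
              rw [hM', hS', hixM', pv_ix_append_self q x hxq]
              simp [pvStepA, pvGtNegInf, hx1, hgt, hmx, pvIxOf]
            | some s =>
              have hfs : PySem.List.max? ((pvOdds q).filter (fun v => v < m)) (fun x => x) = some s := by
                simp only [pvSndV, hM] at hS; exact hS
              have hsfil : s ∈ (pvOdds q).filter (fun v => v < m) := PySem.List.max?_mem hfs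
              have hsub : ∀ y ∈ (pvOdds q).filter (fun v => v < m), y ≤ s :=
                fun y hy => PySem.List.max?_isMax hfs y hy
              have hsq : s ∈ q := ((pv_mem_odds q s).mp (List.mem_of_mem_filter hsfil)).1
              by_cases hgs : s < x
              · -- new second
                have hxq : x ∉ q := by
                  intro hxq
                  have h1 : x ∈ (pvOdds q).filter (fun v => v < m) :=
                    List.mem_filter.mpr ⟨(pv_mem_odds q x).mpr ⟨hxq, hxne⟩, by simp [hxlt]⟩
                  have := hsub x h1; omega
                have hS' : pvSndV (q ++ [x]) = some x := by
                  simp only [pvSndV, hM']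
                  rw [hfil, pv_max?_eq_some_iff]
                  refine ⟨List.mem_append_right _ (List.mem_singleton_self x), ?_⟩
                  intro y hy
                  rcases List.mem_append.mp hy with h | h
                  · have := hsub y h; omega
                  · rw [List.mem_singleton.mp h]
                have hmx : ¬ m = x := fun h => hxm h.symm
                rw [hM', hS', hixM', pv_ix_append_self q x hxq]
                simp [pvStepA, pvGtNegInf, hx1, hgt, hmx, hgs]
              · -- x ≤ s: state unchanged
                have hS' : pvSndV (q ++ [x]) = some s := by
                  simp only [pvSndV, hM']
                  rw [hfil, pv_max?_eq_some_iff]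
                  refine ⟨List.mem_append_left _ hsfil, ?_⟩
                  intro y hy
                  rcases List.mem_append.mp hy with h | h
                  · exact hsub y h
                  · rw [List.mem_singleton.mp h]; omega
                rw [hM', hS', hixM', pv_ix_append_of_mem q x s hsq]
                simp [pvStepA, pvGtNegInf, hx1, hgt, hgs]

lemma pv_alt_eval (nums : List Int) :
    find_second_largest_odd_index_alt nums = pvIxOf nums (pvSndV nums) := by
  unfold find_second_largest_odd_index_alt
  show (if (pvOdds nums).isEmpty = true then -1
        else match PySem.List.max? (pvOdds nums) (fun x => x) with
        | none => -1
        | some m =>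
          if ((pvOdds nums).filter (fun v => v < m)).isEmpty = true then (-1 : Int)
          else match PySem.List.max? ((pvOdds nums).filter (fun v => v < m)) (fun x => x) with
            | none => -1
            | some s => match PySem.List.index? nums s with
              | none => -1
              | some k => (k : Int)) = _
  by_cases h1 : (pvOdds nums).isEmpty = true
  · rw [if_pos h1]
    have hm : pvMaxV nums = none := by
      rw [pvMaxV, PySem.List.max?_eq_none_iff]; exact List.isEmpty_iff.mp h1
    simp only [pvSndV, hm, pvIxOf]
  · rw [if_neg h1]
    cases hmx : PySem.List.max? (pvOdds nums) (fun x => x) with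
    | none =>
      exact absurd (List.isEmpty_iff.mpr ((PySem.List.max?_eq_none_iff _ _).mp hmx)) h1
    | some m =>
      have hS : pvSndV nums = PySem.List.max? ((pvOdds nums).filter (fun v => v < m)) (fun x => x) := by
        simp only [pvSndV, pvMaxV, hmx]
      dsimp only
      by_cases h2 : ((pvOdds nums).filter (fun v => v < m)).isEmpty = true
      · rw [if_pos h2, hS, (PySem.List.max?_eq_none_iff _ _).mpr (List.isEmpty_iff.mp h2)]
        rfl
      · rw [if_neg h2]
        cases hlow : PySem.List.max? ((pvOdds nums).filter (fun v => v < m)) (fun x => x) with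
        | none =>
          exact absurd (List.isEmpty_iff.mpr ((PySem.List.max?_eq_none_iff _ _).mp hlow)) h2
        | some s =>
          rw [hS, hlow]
          rfl

-- ===== VERDICT (by name: the statement is the Claim_ definition above) =====
theorem find_second_largest_odd_index_spec : Claim_equal_find_second_largest_odd_index := by
  intro nums _
  unfold Spec_find_second_largest_odd_index find_second_largest_odd_index
  rw [pv_state_char]
  exact (pv_alt_eval nums).symm
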